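-- pv_equiv track=rewrite | github.com/BenM61/NLP_proj | create_datasets/create_db/preprocessing.py | is_valid_song
-- ===== SOURCE A (Python) =====
-- def is_valid_song(lyrics):
--     if (len(lyrics) == 0): #empty song
--         return False
--     verses = 0
--     lines_in_verse = 0
--     words = 0
--     for line in lyrics:
--         words += len(line.split())
--         line = line.upper()
--         if "CHORUS" in line or "REPEAT" in line:
--             return False
--         for i in range(1,10):
--             if ("X"+str(i)) in line:
--                 return False
--             if ("VERSE "+str(i)) in line:
--                 return False
--         if (line == "\n" or line == "\r\n"):
--             if (lines_in_verse > 2):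
--                 verses += 1
--             lines_in_verse = 0
--         else:
--             lines_in_verse += 1
--
--     if verses > 1 and (words >= 80 and words <= 400):
--         return True
--
--     return False
-- ===== SOURCE B (Python) =====
-- def is_valid_song(lyrics):
--     pats = ["CHORUS", "REPEAT"] + [p for i in range(1, 10)
--                                    for p in ("X" + str(i), "VERSE " + str(i))]
--     if any(p in line.upper() for line in lyrics for p in pats):
--         return False
--     words = sum(len(line.split()) for line in lyrics)
--     blanks = [i for i, line in enumerate(lyrics) if line in ("\n", "\r\n")]
--     verses = sum(b - p > 3 for p, b in zip([-1] + blanks, blanks))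
--     return verses > 1 and 80 <= words <= 400
-- ===== Notes on version B (the rewrite author's own statement) =====
-- stated objective: alternative
-- what changed: Single accumulator loop with early returns replaced by separate passes: one any() over a precomputed forbidden-pattern list, a sum() for total words, and verse counting via blank-line indices paired with zip instead of a running lines_in_verse counter.
import Mathlib
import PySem

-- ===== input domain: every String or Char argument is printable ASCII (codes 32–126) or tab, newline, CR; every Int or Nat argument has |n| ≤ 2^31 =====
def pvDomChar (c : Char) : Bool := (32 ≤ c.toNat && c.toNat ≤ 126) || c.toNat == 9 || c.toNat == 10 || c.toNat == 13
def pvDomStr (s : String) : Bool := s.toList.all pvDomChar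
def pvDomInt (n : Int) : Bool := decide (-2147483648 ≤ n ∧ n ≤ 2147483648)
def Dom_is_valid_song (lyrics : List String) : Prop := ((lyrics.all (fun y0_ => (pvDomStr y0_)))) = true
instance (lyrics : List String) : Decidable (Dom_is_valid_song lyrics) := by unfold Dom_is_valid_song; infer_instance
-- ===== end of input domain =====

-- B restates A as separate passes (pattern any(), word sum(), verse count from blank-line
-- indices via zip) instead of one accumulator loop with early returns; return value only, no mutation.

-- ===== PORT A =====
-- string containment / concatenation are ported on List Char (PySem.Chars.*), where they are exact
def pvForbiddenA (u : List Char) : Bool :=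
  PySem.Chars.isIn "CHORUS".toList u || PySem.Chars.isIn "REPEAT".toList u ||
  (PySem.List.pyRange 1 10 1).any (fun i =>
    PySem.Chars.isIn ('X' :: PySem.Int.toChars i) u ||
    PySem.Chars.isIn ("VERSE ".toList ++ PySem.Int.toChars i) u)

-- A's for-loop with its three early exits, state (verses, lines_in_verse, words)
def pvLoopA : List String → Int → Int → Int → Bool
  | [], verses, _liv, words =>
      decide (verses > 1) && (decide (words ≥ 80) && decide (words ≤ 400))
  | line :: rest, verses, liv, words =>
      let words' := words + PySem.List.len (PySem.Str.split₀ line)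
      let u := PySem.Chars.upper line.toList
      if pvForbiddenA u then false
      else if u == "\n".toList || u == "\r\n".toList then
        pvLoopA rest (if liv > 2 then verses + 1 else verses) 0 words'
      else
        pvLoopA rest verses (liv + 1) words'

def is_valid_song (lyrics : List String) : Bool :=
  if PySem.List.len lyrics == 0 then false
  else pvLoopA lyrics 0 0 0

-- ===== PORT B =====
-- pats = ["CHORUS", "REPEAT"] + [p for i in range(1,10) for p in ("X"+str(i), "VERSE "+str(i))]
def pvPats : List (List Char) :=
  ["CHORUS".toList, "REPEAT".toList] ++
  (PySem.List.pyRange 1 10 1).flatMap (fun i =>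
    ['X' :: PySem.Int.toChars i, "VERSE ".toList ++ PySem.Int.toChars i])

def is_valid_song_alt (lyrics : List String) : Bool :=
  if lyrics.any (fun line => pvPats.any (fun p => PySem.Chars.isIn p (PySem.Chars.upper line.toList))) then
    false
  else
    let words := (lyrics.map (fun line => PySem.List.len (PySem.Str.split₀ line))).sum
    let blanks := ((PySem.List.enumerate lyrics 0).filter
        (fun il => il.2.toList == "\n".toList || il.2.toList == "\r\n".toList)).map (·.1)
    let verses := ((List.zip ((-1) :: blanks) blanks).map
        (fun pb => if pb.2 - pb.1 > 3 then (1 : Int) else 0)).sum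
    decide (verses > 1) && (decide (80 ≤ words) && decide (words ≤ 400))

-- ===== PRECONDITION & SPEC =====
def Spec_is_valid_song (lyrics : List String) (out : Bool) : Prop := out = is_valid_song_alt lyrics
instance (lyrics : List String) (out : Bool) : Decidable (Spec_is_valid_song lyrics out) := by unfold Spec_is_valid_song; infer_instance

-- ===== CLAIM (what is proved, stated in full; the proofs are below) =====
def Claim_equal_is_valid_song : Prop := ∀ (lyrics : List String), Dom_is_valid_song lyrics → Spec_is_valid_song lyrics (is_valid_song lyrics)

-- ===== LEMMAS AND PROOFS =====

-- the two pattern checks agree on every line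
theorem pats_any_eq (u : List Char) :
    pvPats.any (fun p => PySem.Chars.isIn p u) = pvForbiddenA u := by
  have h : PySem.List.pyRange 1 10 1 = [1,2,3,4,5,6,7,8,9] := by decide
  simp [pvPats, pvForbiddenA, h, List.any, Bool.or_assoc]

-- upperChar leaves any char fixed and cannot produce a char below 'A'
theorem upperChar_fix (c d : Char) (hd : d.toNat < 65) :
    (PySem.Chars.upperChar c = d) ↔ c = d := by
  unfold PySem.Chars.upperChar
  by_cases h : PySem.Chars.islower c = true
  · have hc : 97 ≤ c.toNat ∧ c.toNat ≤ 122 := by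
      have h' : 'a' ≤ c ∧ c ≤ 'z' := by simpa [PySem.Chars.islower] using h
      obtain ⟨a1, a2⟩ := h'
      rw [Char.le_def, UInt32.le_iff_toNat_le] at a1 a2
      exact ⟨a1, a2⟩
    have hv : (Char.ofNat (c.toNat - 32)).toNat = c.toNat - 32 := by
      rw [Char.toNat_ofNat, if_pos (Or.inl (by omega))]
    simp only [h, if_pos]
    constructor
    · intro he; exact absurd (congrArg Char.toNat he) (by rw [hv]; omega)
    · intro he; exact absurd (congrArg Char.toNat he) (by omega)
  · simp [h]

theorem upper_eq_ctl : ∀ (l ds : List Char), (∀ d ∈ ds, d.toNat < 65) →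
    ((PySem.Chars.upper l = ds) ↔ l = ds) := by
  intro l
  induction l with
  | nil => intro ds _; cases ds <;> simp [PySem.Chars.upper]
  | cons c t ih =>
      intro ds hd
      cases ds with
      | nil => simp [PySem.Chars.upper]
      | cons d es =>
          have h1 := upperChar_fix c d (hd d (by simp))
          have h2 := ih es (fun x hx => hd x (by simp [hx]))
          simp only [PySem.Chars.upper, List.map_cons, List.cons.injEq] at *
          rw [h1, h2]

-- blank-line test: uppercasing cannot create or destroy "\n" / "\r\n"
theorem upper_blank_eq (l : List Char) :
    ((PySem.Chars.upper l == "\n".toList) || (PySem.Chars.upper l == "\r\n".toList)) =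
      ((l == "\n".toList) || (l == "\r\n".toList)) := by
  have h1 := upper_eq_ctl l ['\n'] (by simp)
  have h2 := upper_eq_ctl l ['\r', '\n'] (by simp)
  have hb : ∀ (x y : List Char), (x == y) = decide (x = y) := fun x y => by
    by_cases h : x = y <;> simp [h]
  simp [hb, h1, h2]

-- B's verse machinery, written as recursions for the proof
def pvBlanksFrom : List String → Int → List Int
  | [], _ => []
  | line :: rest, k =>
      if (line.toList == "\n".toList || line.toList == "\r\n".toList) then
        k :: pvBlanksFrom rest (k + 1)
      else pvBlanksFrom rest (k + 1)

def pvZCount : Int → List Int → Int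
  | _, [] => 0
  | p, b :: r => (if b - p > 3 then (1 : Int) else 0) + pvZCount b r

def pvVersesFrom : List String → Int → Int
  | [], _ => 0
  | line :: rest, liv =>
      if (line.toList == "\n".toList || line.toList == "\r\n".toList) then
        (if liv > 2 then 1 else 0) + pvVersesFrom rest 0
      else pvVersesFrom rest (liv + 1)

theorem blanks_eq : ∀ (lyrics : List String) (k : Int),
    ((PySem.List.enumerate lyrics k).filter
        (fun il => il.2.toList == "\n".toList || il.2.toList == "\r\n".toList)).map (·.1) =
      pvBlanksFrom lyrics k := by
  intro lyrics
  induction lyrics with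
  | nil => intro k; simp [PySem.List.enumerate, pvBlanksFrom]
  | cons line rest ih =>
      intro k
      simp only [PySem.List.enumerate_cons, pvBlanksFrom, List.filter_cons]
      split <;> simp_all

theorem zcount_eq : ∀ (bs : List Int) (p : Int),
    ((List.zip (p :: bs) bs).map (fun pb => if pb.2 - pb.1 > 3 then (1 : Int) else 0)).sum =
      pvZCount p bs := by
  intro bs
  induction bs with
  | nil => intro p; simp [pvZCount]
  | cons b r ih => intro p; simp [pvZCount, ih]

theorem zcount_versesFrom : ∀ (lyrics : List String) (k liv prev : Int),
    prev = k - liv - 1 →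
    pvZCount prev (pvBlanksFrom lyrics k) = pvVersesFrom lyrics liv := by
  intro lyrics
  induction lyrics with
  | nil => intro k liv prev _; simp [pvBlanksFrom, pvZCount, pvVersesFrom]
  | cons line rest ih =>
      intro k liv prev hprev
      by_cases h : (line.toList == "\n".toList || line.toList == "\r\n".toList) = true
      · simp only [pvBlanksFrom, pvVersesFrom, h, if_pos]
        simp only [pvZCount]
        rw [ih (k + 1) 0 k (by omega)]
        have h1 : (k - prev > 3) ↔ (liv > 2) := by omega
        by_cases h2 : liv > 2 <;> simp [h1, h2]
      · simp only [pvBlanksFrom, pvVersesFrom, h, if_neg, Bool.not_eq_true]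
        exact ih (k + 1) (liv + 1) prev (by omega)

theorem decide_band_key (v1 v2 w1 w2 : Int) (hv : v1 = v2) (hw : w1 = w2) :
    (decide (v1 > 1) && (decide (w1 ≥ 80) && decide (w1 ≤ 400))) =
      (decide (v2 > 1) && (decide (w2 ≥ 80) && decide (w2 ≤ 400))) := by
  subst hv; subst hw; rfl

theorem loopA_eq : ∀ (lyrics : List String) (verses liv words : Int),
    pvLoopA lyrics verses liv words =
      (if lyrics.any (fun line => pvForbiddenA (PySem.Chars.upper line.toList)) then false
       else
        decide (verses + pvVersesFrom lyrics liv > 1) &&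
          (decide (words + (lyrics.map (fun line => PySem.List.len (PySem.Str.split₀ line))).sum ≥ 80) &&
           decide (words + (lyrics.map (fun line => PySem.List.len (PySem.Str.split₀ line))).sum ≤ 400))) := by
  intro lyrics
  induction lyrics with
  | nil =>
      intro verses liv words
      simp [pvLoopA, pvVersesFrom]
  | cons line rest ih =>
      intro verses liv words
      by_cases hf : pvForbiddenA (PySem.Chars.upper line.toList) = true
      · simp [pvLoopA, hf]
      · simp only [pvLoopA, List.any_cons, hf, Bool.false_or, Bool.false_eq_true, if_false]
        rw [upper_blank_eq line.toList]
        by_cases hb : (line.toList == "\n".toList || line.toList == "\r\n".toList) = true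
        · rw [if_pos hb, ih]
          simp only [pvVersesFrom, hb, if_true, List.map_cons, List.sum_cons]
          by_cases ha : rest.any (fun l => pvForbiddenA (PySem.Chars.upper l.toList)) = true
          · simp [ha]
          · simp only [ha, Bool.false_eq_true, if_false]
            refine decide_band_key _ _ _ _ ?_ (by omega)
            by_cases h2 : liv > 2
            · simp [h2]; omega
            · simp [h2]
        · rw [if_neg (by simp at hb ⊢; exact hb), ih]
          simp only [pvVersesFrom, hb, Bool.false_eq_true, if_false, List.map_cons, List.sum_cons]
          by_cases ha : rest.any (fun l => pvForbiddenA (PySem.Chars.upper l.toList)) = true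
          · simp [ha]
          · simp only [ha, Bool.false_eq_true, if_false]
            exact decide_band_key _ _ _ _ rfl (by omega)

-- ===== VERDICT (by name: the statement is the Claim_ definition above) =====
theorem is_valid_song_spec : Claim_equal_is_valid_song := by
  intro lyrics _
  unfold Spec_is_valid_song
  cases lyrics with
  | nil => decide
  | cons line rest =>
      unfold is_valid_song is_valid_song_alt
      have hlen : (PySem.List.len (line :: rest) == 0) = false := by
        simp [PySem.List.len_eq]
        omega
      simp only [hlen, Bool.false_eq_true, if_false]
      rw [loopA_eq]
      simp only [pats_any_eq, blanks_eq, zcount_eq,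
        zcount_versesFrom (line :: rest) 0 0 (-1) (by omega)]
      simp [ge_iff_le]
      rfl
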